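-- pv_equiv track=rewrite | github.com/tyler-cowls/CM124-EM | em-phasing.py | phase
-- ===== SOURCE A (Python) =====
-- def get_haplotypes(gen):
-- 	haps = []
-- 	def parse(head, tail):
-- 		if len(tail) == 0:
-- 			haps.append(head);
-- 		else:
-- 			if tail[0] == '0':
-- 				parse(head+'0', tail[1:])
-- 			elif tail[0] == '2':
-- 				parse(head+'1', tail[1:])
-- 			else:
-- 				parse(head+'1', tail[1:])
-- 				parse(head+'0', tail[1:])
-- 	parse('', gen)
-- 	return haps
--
-- def phase(gen):
-- 	haps = get_haplotypes(gen)
-- 	phases = []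
-- 	num_haps = len(haps)
-- 	if num_haps == 1:
-- 		phases.append((haps[0], haps[0]))
-- 	else:
-- 		for i in range(0, (int)(num_haps/2)):
-- 			phases.append((haps[i], haps[-(i+1)]))
-- 	return (phases, haps)
-- ===== SOURCE B (Python) =====
-- def phase(gen):
--     # count heterozygous positions (any char other than '0'/'2')
--     k = sum(1 for c in gen if c != '0' and c != '2')
--     haps = []
--     for n in range(2 ** k):
--         rem = k
--         chars = []
--         for c in gen:
--             if c == '0':
--                 chars.append('0')
--             elif c == '2':
--                 chars.append('1')
--             else:
--                 rem -= 1
--                 chars.append('0' if (n >> rem) & 1 else '1')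
--         haps.append(''.join(chars))
--     m = len(haps)
--     if m == 1:
--         phases = [(haps[0], haps[0])]
--     else:
--         phases = [(haps[i], haps[m - 1 - i]) for i in range(m // 2)]
--     return (phases, haps)
-- ===== Notes on version B (the rewrite author's own statement) =====
-- stated objective: alternative
-- what changed: replaces the branching string recursion that enumerates haplotypes by DFS with a single counting loop n = 0..2^k-1 that writes each haplotype directly from the bits of n into the heterozygous slots of one left-to-right scan, plus index pairing without negative indices
import Mathlib
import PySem

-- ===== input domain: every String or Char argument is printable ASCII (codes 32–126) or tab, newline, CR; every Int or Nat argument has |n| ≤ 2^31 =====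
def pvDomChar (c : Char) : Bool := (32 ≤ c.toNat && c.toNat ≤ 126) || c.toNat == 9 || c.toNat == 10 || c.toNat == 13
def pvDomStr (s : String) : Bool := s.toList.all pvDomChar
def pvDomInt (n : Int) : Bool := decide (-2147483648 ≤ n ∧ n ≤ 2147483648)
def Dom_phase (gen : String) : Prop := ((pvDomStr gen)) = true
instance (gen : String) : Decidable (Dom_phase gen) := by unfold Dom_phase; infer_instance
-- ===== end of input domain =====

-- B replaces A's branching string recursion by one counting loop n = 0..2^k-1 that writes each
-- haplotype directly from the bits of n (objective: alternative decomposition, same cost).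

-- ===== PORT A =====
-- inner 'parse' of get_haplotypes: the list of haplotypes appended in DFS order
def pvParse (head : String) (tail : List Char) : List String :=
  match tail with
  | [] => [head]
  | c :: rest =>
    if c = '0' then pvParse (head ++ "0") rest
    else if c = '2' then pvParse (head ++ "1") rest
    else pvParse (head ++ "1") rest ++ pvParse (head ++ "0") rest

def phase (gen : String) : (List (String × String)) × List String :=
  let haps := pvParse "" gen.toList
  let numHaps : Int := (haps.length : Int)
  let phases : List (String × String) :=
    if numHaps = 1 then
      [((PySem.List.pyGet? haps 0).getD "", (PySem.List.pyGet? haps 0).getD "")]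
    else
      (PySem.List.pyRange 0 (PySem.Int.floordiv numHaps 2) 1).foldl
        (fun acc i =>
          acc ++ [((PySem.List.pyGet? haps i).getD "",
                   (PySem.List.pyGet? haps (-(i + 1))).getD "")]) []
  (phases, haps)

-- ===== PORT B =====
-- one haplotype from the bits of n: bit (rem-1) of n decides each heterozygous slot
def pvBuild (chars : List Char) (n : Nat) (rem : Nat) : List Char :=
  match chars with
  | [] => []
  | c :: r =>
    if c = '0' then '0' :: pvBuild r n rem
    else if c = '2' then '1' :: pvBuild r n rem
    else (if (n >>> (rem - 1)) &&& 1 = 1 then '0' else '1') :: pvBuild r n (rem - 1)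

def phase_alt (gen : String) : (List (String × String)) × List String :=
  let k := gen.toList.countP (fun c => !(c = '0') && !(c = '2'))
  let haps := (List.range (2 ^ k)).map (fun n => String.ofList (pvBuild gen.toList n k))
  let m := haps.length
  let phases : List (String × String) :=
    if m = 1 then [(haps.getD 0 "", haps.getD 0 "")]
    else (List.range (m / 2)).map (fun i => (haps.getD i "", haps.getD (m - 1 - i) ""))
  (phases, haps)

-- ===== PRECONDITION & SPEC =====
def Spec_phase (gen : String) (out : (List (String × String)) × List String) : Prop := out = phase_alt gen
instance (gen : String) (out : (List (String × String)) × List String) : Decidable (Spec_phase gen out) := by unfold Spec_phase; infer_instance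

-- ===== CLAIM (what is proved, stated in full; the proofs are below) =====
def Claim_equal_phase : Prop := ∀ (gen : String), Dom_phase gen → Spec_phase gen (phase gen)

-- ===== LEMMAS AND PROOFS =====

-- clean recursion producing A's haplotypes as char lists
def pvHapsC : List Char → List (List Char)
  | [] => [[]]
  | c :: r =>
    if c = '0' then (pvHapsC r).map ('0' :: ·)
    else if c = '2' then (pvHapsC r).map ('1' :: ·)
    else (pvHapsC r).map ('1' :: ·) ++ (pvHapsC r).map ('0' :: ·)

theorem pv_cons0 (head : String) (l : List Char) :
    (head ++ "0") ++ String.ofList l = head ++ String.ofList ('0' :: l) := by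
  apply String.ext; simp

theorem pv_cons1 (head : String) (l : List Char) :
    (head ++ "1") ++ String.ofList l = head ++ String.ofList ('1' :: l) := by
  apply String.ext; simp

theorem pvParse_eq (tail : List Char) : ∀ head,
    pvParse head tail = (pvHapsC tail).map (fun l => head ++ String.ofList l) := by
  induction tail with
  | nil => intro head; simp [pvParse, pvHapsC]
  | cons c r ih =>
    intro head
    simp only [pvParse, pvHapsC]
    split_ifs with h1 h2
    · rw [ih, List.map_map]
      apply List.map_congr_left; intro l _
      simpa [Function.comp] using pv_cons0 head l
    · rw [ih, List.map_map]
      apply List.map_congr_left; intro l _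
      simpa [Function.comp] using pv_cons1 head l
    · rw [ih, ih, List.map_append, List.map_map, List.map_map]
      congr 1
      · apply List.map_congr_left; intro l _
        simpa [Function.comp] using pv_cons1 head l
      · apply List.map_congr_left; intro l _
        simpa [Function.comp] using pv_cons0 head l

def pvHet (l : List Char) : Nat := l.countP (fun c => !(c = '0') && !(c = '2'))

theorem pvHet_cons (c : Char) (r : List Char) :
    pvHet (c :: r) = (if c = '0' ∨ c = '2' then pvHet r else pvHet r + 1) := by
  by_cases h0 : c = '0' <;> by_cases h2 : c = '2' <;>
    simp [pvHet, h0, h2]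

theorem pv_shift_lt {n k : Nat} (h : n < 2 ^ k) : (n >>> k) &&& 1 = 0 := by
  rw [Nat.shiftRight_eq_div_pow, Nat.div_eq_of_lt h]
  decide

theorem pv_shift_hi {n k : Nat} (h : n < 2 ^ k) : ((2 ^ k + n) >>> k) &&& 1 = 1 := by
  have hpos : 0 < 2 ^ k := Nat.two_pow_pos k
  rw [Nat.shiftRight_eq_div_pow, Nat.add_comm, Nat.add_div_right _ hpos,
    Nat.div_eq_of_lt h]
  decide

theorem pv_shift_add {m j i : Nat} (hij : i < j) :
    ((2 ^ j + m) >>> i) &&& 1 = (m >>> i) &&& 1 := by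
  rw [Nat.shiftRight_eq_div_pow, Nat.shiftRight_eq_div_pow]
  have hji : i + (j - i) = j := by omega
  have h : 2 ^ j + m = 2 ^ i * 2 ^ (j - i) + m := by rw [← pow_add, hji]
  rw [h, Nat.mul_add_div (Nat.two_pow_pos i)]
  rw [Nat.and_one_is_mod, Nat.and_one_is_mod]
  have h2 : 2 ^ (j - i) = 2 * 2 ^ (j - i - 1) := by
    rw [← pow_succ']; congr 1; omega
  omega

theorem pvBuild_add_pow (r : List Char) : ∀ (m j rem : Nat), pvHet r ≤ rem → rem ≤ j →
    pvBuild r (2 ^ j + m) rem = pvBuild r m rem := by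
  induction r with
  | nil => intros; rfl
  | cons c t ih =>
    intro m j rem hhet hrem
    rw [pvHet_cons] at hhet
    by_cases h0 : c = '0'
    · simp only [pvBuild, if_pos h0]
      rw [ih m j rem (by simp [h0] at hhet; omega) hrem]
    · by_cases h2 : c = '2'
      · simp only [pvBuild, if_neg h0, if_pos h2]
        rw [ih m j rem (by simp [h2] at hhet; omega) hrem]
      · have hh : pvHet t + 1 ≤ rem := by simp [h0, h2] at hhet; omega
        simp only [pvBuild, if_neg h0, if_neg h2]
        rw [pv_shift_add (show rem - 1 < j by omega), ih m j (rem - 1) (by omega) (by omega)]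

theorem pvHapsC_eq (chars : List Char) :
    pvHapsC chars = (List.range (2 ^ pvHet chars)).map (fun n => pvBuild chars n (pvHet chars)) := by
  induction chars with
  | nil => simp [pvHapsC, pvHet, pvBuild]
  | cons c r ih =>
    by_cases h0 : c = '0'
    · have hk : pvHet (c :: r) = pvHet r := by rw [pvHet_cons]; simp [h0]
      simp only [pvHapsC, if_pos h0, hk, ih, List.map_map]
      apply List.map_congr_left; intro n _
      simp [pvBuild, h0, Function.comp]
    · by_cases h2 : c = '2'
      · have hk : pvHet (c :: r) = pvHet r := by rw [pvHet_cons]; simp [h2]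
        simp only [pvHapsC, if_neg h0, if_pos h2, hk, ih, List.map_map]
        apply List.map_congr_left; intro n _
        simp [pvBuild, h2, Function.comp]
      · have hk : pvHet (c :: r) = pvHet r + 1 := by rw [pvHet_cons]; simp [h0, h2]
        have hsplit : (2 : Nat) ^ (pvHet r + 1) = 2 ^ pvHet r + 2 ^ pvHet r := by ring
        rw [hk, hsplit, List.range_add]
        simp only [pvHapsC, if_neg h0, if_neg h2, List.map_append, List.map_map, ih]
        congr 1
        · apply List.map_congr_left; intro n hn
          rw [List.mem_range] at hn
          simp only [Function.comp, pvBuild, if_neg h0, if_neg h2,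
            Nat.add_sub_cancel, pv_shift_lt hn]
          simp
        · apply List.map_congr_left; intro n hn
          rw [List.mem_range] at hn
          simp only [Function.comp, pvBuild, if_neg h0, if_neg h2,
            Nat.add_sub_cancel, pv_shift_hi hn]
          rw [pvBuild_add_pow r n (pvHet r) (pvHet r) le_rfl le_rfl]
          simp

theorem pv_haps_eq (gen : String) :
    pvParse "" gen.toList
      = (List.range (2 ^ pvHet gen.toList)).map
          (fun n => String.ofList (pvBuild gen.toList n (pvHet gen.toList))) := by
  rw [pvParse_eq, pvHapsC_eq, List.map_map]
  apply List.map_congr_left; intro n _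
  apply String.ext; simp

theorem pv_foldl_snoc {α β : Type} (l : List α) (f : α → β) : ∀ acc,
    l.foldl (fun a x => a ++ [f x]) acc = acc ++ l.map f := by
  induction l with
  | nil => intro acc; simp
  | cons x t ih => intro acc; simp [ih]

-- ===== VERDICT (by name: the statement is the Claim_ definition above) =====
theorem phase_spec : Claim_equal_phase := by
  intro gen _
  unfold Spec_phase
  simp only [phase, phase_alt]
  rw [pv_haps_eq gen]
  set k := pvHet gen.toList with hkdef
  have hcount : gen.toList.countP (fun c => !(c = '0') && !(c = '2')) = k := rfl
  rw [hcount]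
  set L := (List.range (2 ^ k)).map (fun n => String.ofList (pvBuild gen.toList n k)) with hL
  have hm : L.length = 2 ^ k := by simp [hL]
  have hpos : 0 < 2 ^ k := Nat.two_pow_pos k
  refine Prod.ext ?_ rfl
  by_cases h1 : L.length = 1
  · have h1' : (L.length : Int) = 1 := by exact_mod_cast h1
    rw [if_pos h1', if_pos h1]
    have h0 : L[0]? = some L[0] := List.getElem?_eq_getElem (by omega)
    simp [PySem.List.pyGet?_zero, h0, List.getD_eq_getElem?_getD]
  · have h1' : ¬ ((L.length : Int) = 1) := by exact_mod_cast h1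
    rw [if_neg h1', if_neg h1]
    have hfd : PySem.Int.floordiv (L.length : Int) 2 = ((L.length / 2 : Nat) : Int) := by
      rw [PySem.Int.floordiv_eq_ediv_of_pos (by norm_num)]
      omega
    rw [hfd, pv_foldl_snoc, List.nil_append]
    rw [PySem.List.pyRange_one, List.map_map]
    have hto : (((L.length / 2 : Nat) : Int) - 0).toNat = L.length / 2 := by omega
    rw [hto]
    apply List.map_congr_left
    intro i hi
    rw [List.mem_range] at hi
    have him : i < L.length := Nat.lt_of_lt_of_le hi (Nat.div_le_self _ _)
    have hip : i + 1 ≤ L.length := him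
    have hgi : PySem.List.pyGet? L ((0 : Int) + (i : Int)) = some L[i] := by
      rw [zero_add, PySem.List.pyGet?_natCast]
      exact List.getElem?_eq_getElem him
    have hneg : (-(((0 : Int) + (i : Int)) + 1)) = -(((i + 1 : Nat) : Int)) := by
      push_cast; ring
    have hgj : PySem.List.pyGet? L (-(((i + 1 : Nat) : Int))) = L[L.length - (i + 1)]? :=
      PySem.List.pyGet?_neg_natCast L (i + 1) (by omega) hip
    have hj : L.length - (i + 1) = L.length - 1 - i := by omega
    have hjlt : L.length - 1 - i < L.length := by omega
    simp only [Function.comp, hgi, hneg, hgj, hj, Option.getD_some,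
      List.getElem?_eq_getElem hjlt, List.getD_eq_getElem?_getD,
      List.getElem?_eq_getElem him]
    rfl
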